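-- pv_equiv track=rewrite | github.com/JacobsGH/Dirichle-Libman | LibmanD.py | ReserchY
-- ===== SOURCE A (Python) =====
-- def ReserchY(Turtle):
--     Turtle2=[]
--     n=len(Turtle)
--     for j in range(0,n):
--         p1x,p1y=Turtle[j]
--         Turtle2.append((p1x,p1y))
--         for i in range(j+1,n):
--              p2x,p2y=Turtle[i]
--              if p2y==p1y:
--                  Turtle2.append((p2x,p2y))
--     li = []
--     for i in Turtle2:
--         if i not in li:
--             li.append(i)
--     return li
-- ===== SOURCE B (Python) =====
-- def ReserchY(Turtle):
--     groups = {}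
--     for x, y in Turtle:
--         groups.setdefault(y, []).append((x, y))
--     li = []
--     for pts in groups.values():
--         for p in pts:
--             if p not in li:
--                 li.append(p)
--     return li
-- ===== Notes on version B (the rewrite author's own statement) =====
-- stated objective: faster
-- what changed: Replaces A's nested suffix re-scan (which builds a quadratic-size intermediate list) plus a separate dedup pass by one grouping pass into an insertion-ordered dict y -> points, then a flatten of the groups with first-occurrence dedup.
import Mathlib
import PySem

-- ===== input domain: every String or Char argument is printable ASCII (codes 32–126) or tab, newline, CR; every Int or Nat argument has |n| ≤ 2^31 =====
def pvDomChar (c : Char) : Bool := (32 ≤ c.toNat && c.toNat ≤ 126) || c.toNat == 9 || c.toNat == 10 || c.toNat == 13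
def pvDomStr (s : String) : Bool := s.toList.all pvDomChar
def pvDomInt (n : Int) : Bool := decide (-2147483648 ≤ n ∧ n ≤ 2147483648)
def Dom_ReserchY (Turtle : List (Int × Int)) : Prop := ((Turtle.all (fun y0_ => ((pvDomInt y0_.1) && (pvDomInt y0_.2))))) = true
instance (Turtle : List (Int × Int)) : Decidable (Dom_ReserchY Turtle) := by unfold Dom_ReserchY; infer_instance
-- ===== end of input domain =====

-- B replaces A's nested suffix re-scan (quadratic-size intermediate list) + separate dedup pass
-- by one grouping pass into an insertion-ordered dict y -> points, then a deduplicating flatten (objective: faster).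

-- ===== PORT A =====
def ReserchY (Turtle : List (Int × Int)) : List (Int × Int) :=
  let n := PySem.List.len Turtle
  -- indices produced by range(0,n) / range(j+1,n) are always in range, so Turtle[j] never raises: pyGetD is exact here
  let Turtle2 := (PySem.List.pyRange 0 n 1).foldl (fun acc j =>
    let p1 := PySem.List.pyGetD Turtle j (0, 0)
    (PySem.List.pyRange (j + 1) n 1).foldl (fun acc2 i =>
      let p2 := PySem.List.pyGetD Turtle i (0, 0)
      if p2.2 == p1.2 then acc2 ++ [p2] else acc2) (acc ++ [p1])) []
  Turtle2.foldl (fun li i => if i ∈ li then li else li ++ [i]) []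

-- ===== PORT B =====
def ReserchY_alt (Turtle : List (Int × Int)) : List (Int × Int) :=
  -- groups.setdefault(y, []).append((x, y))  ==  groups[y] = groups.get(y, []) + [(x, y)]  ==  Dict.modify
  let groups := Turtle.foldl (fun d p => d.modify p.2 [] (fun l => l ++ [p])) PySem.Dict.empty
  (PySem.Dict.values groups).foldl (fun li pts =>
    pts.foldl (fun li p => if p ∈ li then li else li ++ [p]) li) []

-- ===== PRECONDITION & SPEC =====
def Spec_ReserchY (Turtle : List (Int × Int)) (out : List (Int × Int)) : Prop := out = ReserchY_alt Turtle
instance (Turtle : List (Int × Int)) (out : List (Int × Int)) : Decidable (Spec_ReserchY Turtle out) := by unfold Spec_ReserchY; infer_instance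

-- ===== CLAIM (what is proved, stated in full; the proofs are below) =====
def Claim_equal_ReserchY : Prop := ∀ (Turtle : List (Int × Int)), Dom_ReserchY Turtle → Spec_ReserchY Turtle (ReserchY Turtle)

-- ===== LEMMAS AND PROOFS =====

-- A's Turtle2, written structurally: each element, followed by the later elements sharing its y.
def pvT2 : List (Int × Int) → List (Int × Int)
  | [] => []
  | p :: r => (p :: r.filter (fun q => q.2 == p.2)) ++ pvT2 r

-- the common canonical form: for each distinct y (first-appearance order), the distinct points with that y
def pvC (xs : List (Int × Int)) : List (Int × Int) :=
  (PySem.Set.ofList (xs.map Prod.snd)).flatMap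
    (fun y => PySem.Set.ofList (xs.filter (fun q => q.2 == y)))

lemma pv_shift (a b : Int) :
    PySem.List.pyRange (a + 1) (b + 1) 1 = (PySem.List.pyRange a b 1).map (· + 1) := by
  rw [PySem.List.pyRange_one, PySem.List.pyRange_one, List.map_map]
  have : b + 1 - (a + 1) = b - a := by ring
  rw [this]
  apply List.map_congr_left
  intro k _
  simp; ring

lemma pv_getD_shift (p : Int × Int) (r : List (Int × Int)) (i : Int) (d : Int × Int) (h : 0 ≤ i) :
    PySem.List.pyGetD (p :: r) (i + 1) d = PySem.List.pyGetD r i d := by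
  rw [PySem.List.pyGetD_of_nonneg _ _ (by omega), PySem.List.pyGetD_of_nonneg _ _ h]
  have : (i + 1).toNat = i.toNat + 1 := by omega
  rw [this, List.getD_cons_succ]

lemma pv_map_getD (p : Int × Int) (r : List (Int × Int)) (d : Int × Int) :
    (PySem.List.pyRange 1 ((r.length : Int) + 1) 1).map (fun i => PySem.List.pyGetD (p :: r) i d) = r := by
  have h1 : PySem.List.pyRange 1 ((r.length : Int) + 1) 1
      = (PySem.List.pyRange 0 (r.length : Int) 1).map (· + 1) := by
    have := pv_shift 0 (r.length : Int); simpa using this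
  rw [h1, List.map_map]
  have h2 : ∀ i ∈ PySem.List.pyRange 0 (r.length : Int) 1,
      PySem.List.pyGetD (p :: r) (i + 1) d = PySem.List.pyGetD r i d := by
    intro i hi
    exact pv_getD_shift p r i d (PySem.List.mem_pyRange_one.mp hi).1
  calc (PySem.List.pyRange 0 (r.length : Int) 1).map
        ((fun i => PySem.List.pyGetD (p :: r) i d) ∘ (· + 1))
      = (PySem.List.pyRange 0 (r.length : Int) 1).map (fun i => PySem.List.pyGetD r i d) :=
        List.map_congr_left (fun i hi => h2 i hi)
    _ = r := by
        have := PySem.List.map_pyGetD_pyRange_zero r d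
        rwa [PySem.List.len_eq] at this

-- A's nested index loops compute pvT2
lemma pv_A_outer (xs : List (Int × Int)) : ∀ (acc : List (Int × Int)),
    (PySem.List.pyRange 0 (xs.length : Int) 1).foldl (fun acc j =>
      let p1 := PySem.List.pyGetD xs j (0, 0)
      (PySem.List.pyRange (j + 1) (xs.length : Int) 1).foldl (fun acc2 i =>
        let p2 := PySem.List.pyGetD xs i (0, 0)
        if p2.2 == p1.2 then acc2 ++ [p2] else acc2) (acc ++ [p1])) acc
    = acc ++ pvT2 xs := by
  induction xs with
  | nil => intro acc; simp [pvT2, PySem.List.pyRange_one_eq_nil]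
  | cons p r ih =>
    intro acc
    have ih' : ∀ acc : List (Int × Int),
        (PySem.List.pyRange 0 (r.length : Int) 1).foldl (fun acc j =>
          (PySem.List.pyRange (j + 1) (r.length : Int) 1).foldl (fun acc2 i =>
            if (PySem.List.pyGetD r i (0, 0)).2 == (PySem.List.pyGetD r j (0, 0)).2
            then acc2 ++ [PySem.List.pyGetD r i (0, 0)] else acc2)
            (acc ++ [PySem.List.pyGetD r j (0, 0)])) acc
        = acc ++ pvT2 r := ih
    show (PySem.List.pyRange 0 (((p :: r).length : Int)) 1).foldl (fun acc j =>
        (PySem.List.pyRange (j + 1) (((p :: r).length : Int)) 1).foldl (fun acc2 i =>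
          if (PySem.List.pyGetD (p :: r) i (0, 0)).2 == (PySem.List.pyGetD (p :: r) j (0, 0)).2
          then acc2 ++ [PySem.List.pyGetD (p :: r) i (0, 0)] else acc2)
          (acc ++ [PySem.List.pyGetD (p :: r) j (0, 0)])) acc
      = acc ++ pvT2 (p :: r)
    simp only [List.length_cons]
    push_cast
    rw [PySem.List.pyRange_one_cons (by positivity : (0 : Int) < (r.length : Int) + 1)]
    rw [List.foldl_cons]
    simp only [PySem.List.pyGetD_zero_cons]
    have h01 : (0 : Int) + 1 = 1 := by norm_num
    rw [h01]
    rw [PySem.List.foldl_append_if (fun i => (PySem.List.pyGetD (p :: r) i (0, 0)).2 == p.2)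
      (fun i => PySem.List.pyGetD (p :: r) i (0, 0))]
    have hcomp : (fun i => (PySem.List.pyGetD (p :: r) i (0, 0)).2 == p.2)
        = ((fun q : Int × Int => q.2 == p.2) ∘ (fun i => PySem.List.pyGetD (p :: r) i (0, 0))) := rfl
    rw [hcomp, ← List.filter_map, pv_map_getD]
    have hsh : PySem.List.pyRange 1 ((r.length : Int) + 1) 1
        = (PySem.List.pyRange 0 (r.length : Int) 1).map (· + 1) := by
      have := pv_shift 0 (r.length : Int); simpa using this
    rw [hsh, List.foldl_map]
    rw [PySem.List.foldl_congr_mem _ _ (fun acc j =>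
        (PySem.List.pyRange (j + 1) (r.length : Int) 1).foldl (fun acc2 i =>
          if (PySem.List.pyGetD r i (0, 0)).2 == (PySem.List.pyGetD r j (0, 0)).2
          then acc2 ++ [PySem.List.pyGetD r i (0, 0)] else acc2)
          (acc ++ [PySem.List.pyGetD r j (0, 0)])) _ ?_]
    · rw [ih']
      simp [pvT2]
    · intro acc' j hj
      have hj0 : 0 ≤ j := (PySem.List.mem_pyRange_one.mp hj).1
      rw [pv_getD_shift p r j (0, 0) hj0, pv_shift (j + 1) (r.length : Int), List.foldl_map]
      apply PySem.List.foldl_congr_mem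
      intro acc2 i hi
      have hi0 : 0 ≤ i := by
        have := (PySem.List.mem_pyRange_one.mp hi).1; omega
      rw [pv_getD_shift p r i (0, 0) hi0]

lemma pv_dedup_eq_update (xs : List (Int × Int)) (s : List (Int × Int)) :
    xs.foldl (fun li i => if i ∈ li then li else li ++ [i]) s = PySem.Set.update s xs := by
  unfold PySem.Set.update
  apply PySem.List.foldl_congr_mem
  intro acc x _
  rw [PySem.Set.add_eq_ite]

lemma pv_A_char (xs : List (Int × Int)) : ReserchY xs = PySem.Set.ofList (pvT2 xs) := by
  unfold ReserchY
  simp only [PySem.List.len_eq]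
  rw [pv_A_outer xs [], List.nil_append, pv_dedup_eq_update]
  rfl

-- B side
lemma pv_update_flatten (L : List (List (Int × Int))) (s : List (Int × Int)) :
    L.foldl PySem.Set.update s = PySem.Set.update s L.flatten := by
  induction L generalizing s with
  | nil => simp [PySem.Set.update]
  | cons a L ih => rw [List.foldl_cons, ih, List.flatten_cons, PySem.Set.update_append]

lemma pv_B_char (xs : List (Int × Int)) :
    ReserchY_alt xs = PySem.Set.ofList ((PySem.Set.ofList (xs.map Prod.snd)).flatMap
      (fun y => xs.filter (fun q => q.2 == y))) := by
  unfold ReserchY_alt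
  have hkeys : (xs.foldl (fun d p => d.modify p.2 [] (fun l => l ++ [p])) PySem.Dict.empty).keys
      = PySem.Set.ofList (xs.map Prod.snd) := by
    have h := PySem.Dict.keys_foldl_modify_key xs (fun p => p.2) ([] : List (Int × Int))
      (fun _ p => fun l => l ++ [p]) PySem.Dict.empty
    rwa [PySem.Dict.keys_empty, PySem.Set.update_nil_left] at h
  have hnodup : (xs.foldl (fun d p => d.modify p.2 [] (fun l => l ++ [p])) PySem.Dict.empty).keys.Nodup :=
    PySem.Dict.nodup_keys_foldl_modify_key xs (fun p => p.2) [] (fun _ p => fun l => l ++ [p])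
      PySem.Dict.empty PySem.Dict.nodup_keys_empty
  have hgetD : ∀ y, (xs.foldl (fun d p => d.modify p.2 [] (fun l => l ++ [p])) PySem.Dict.empty).getD y []
      = xs.filter (fun q => q.2 == y) := by
    intro y
    have hfold : xs.foldl (fun d p => d.modify p.2 [] (fun l => l ++ [p])) PySem.Dict.empty
        = (xs.map (fun p => ((p.2 : Int), p))).foldl
            (fun d q => d.modify q.1 [] (fun l => l ++ [q.2])) PySem.Dict.empty := by
      rw [List.foldl_map]
    rw [hfold, PySem.Dict.getD_foldl_modify_append, PySem.Dict.getD_empty, List.nil_append,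
      List.filter_map, List.map_map]
    simp [Function.comp_def]
  have hvals : (xs.foldl (fun d p => d.modify p.2 [] (fun l => l ++ [p])) PySem.Dict.empty).values
      = (PySem.Set.ofList (xs.map Prod.snd)).map (fun y => xs.filter (fun q => q.2 == y)) := by
    rw [PySem.Dict.values_eq_map_keys _ hnodup ([] : List (Int × Int)), hkeys]
    exact List.map_congr_left (fun y _ => hgetD y)
  simp only [hvals, pv_dedup_eq_update, pv_update_flatten, PySem.Set.update_nil_left,
    ← List.flatMap_def]

-- pvC's membership
lemma pv_mem_C (xs : List (Int × Int)) (q : Int × Int) : q ∈ pvC xs ↔ q ∈ xs := by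
  unfold pvC
  simp only [List.mem_flatMap, PySem.Set.mem_ofList, List.mem_filter, List.mem_map]
  constructor
  · rintro ⟨y, _, hq, _⟩; exact hq
  · intro hq; exact ⟨q.2, ⟨q, hq, rfl⟩, ⟨hq, by simp⟩⟩

lemma pv_flatMap_drop_empty (l : List Int) (f g : Int → List (Int × Int)) (x : Int)
    (h1 : ∀ y ∈ l, y ≠ x → f y = g y) (h2 : f x = []) :
    l.flatMap f = (l.filter (fun y => !(y == x))).flatMap g := by
  induction l with
  | nil => simp
  | cons a l ih =>
    by_cases ha : a = x
    · subst ha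
      simp only [List.flatMap_cons, List.filter_cons, beq_self_eq_true, Bool.not_true]
      rw [h2, List.nil_append]
      exact ih (fun y hy => h1 y (List.mem_cons_of_mem _ hy))
    · rw [List.filter_cons_of_pos (by simp [ha])]
      simp only [List.flatMap_cons]
      rw [h1 a (List.mem_cons_self) ha, ih (fun y hy => h1 y (List.mem_cons_of_mem _ hy))]

-- ofList distributes over the flatten of same-y blocks (their element sets are disjoint)
lemma pv_ofList_flatMap (xs : List (Int × Int)) (ys : List Int) (hnd : ys.Nodup) :
    PySem.Set.ofList (ys.flatMap (fun y => xs.filter (fun q => q.2 == y)))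
      = ys.flatMap (fun y => PySem.Set.ofList (xs.filter (fun q => q.2 == y))) := by
  induction ys with
  | nil => simp [PySem.Set.ofList]
  | cons y ys ih =>
    simp only [List.flatMap_cons]
    rw [PySem.Set.ofList_append, PySem.Set.update_eq_append_filter]
    have hy : y ∉ ys := (List.nodup_cons.mp hnd).1
    have hfil : (PySem.Set.ofList (ys.flatMap (fun y => xs.filter (fun q => q.2 == y)))).filter
        (fun q => !(PySem.Set.ofList (xs.filter (fun q => q.2 == y))).contains q)
        = PySem.Set.ofList (ys.flatMap (fun y => xs.filter (fun q => q.2 == y))) := by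
      apply List.filter_eq_self.mpr
      intro q hq
      rw [PySem.Set.mem_ofList, List.mem_flatMap] at hq
      obtain ⟨y', hy', hq'⟩ := hq
      have hq2 : q.2 = y' := by simpa using (List.mem_filter.mp hq').2
      have hne : q ∉ PySem.Set.ofList (xs.filter (fun q => q.2 == y)) := by
        rw [PySem.Set.mem_ofList, List.mem_filter]
        rintro ⟨-, h2⟩
        have : q.2 = y := by simpa using h2
        exact hy (this ▸ hq2 ▸ hy')
      cases hc : (PySem.Set.ofList (xs.filter (fun q => q.2 == y))).contains q
      · simp
      · exact absurd ((PySem.Set.contains_iff _ _).mp hc) hne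
    rw [hfil, ih (List.nodup_cons.mp hnd).2]

-- pvT2 dedups to pvC
lemma pv_T2_C (xs : List (Int × Int)) : PySem.Set.ofList (pvT2 xs) = pvC xs := by
  induction xs with
  | nil => simp [pvT2, pvC, PySem.Set.ofList]
  | cons p r ih =>
    show PySem.Set.ofList ((p :: r.filter (fun q => q.2 == p.2)) ++ pvT2 r) = _
    rw [PySem.Set.ofList_append, PySem.Set.update_eq_append_filter, ih]
    -- the filter keeps exactly the points whose y differs from p.2
    have hfil : (pvC r).filter
        (fun q => !(PySem.Set.ofList (p :: r.filter (fun q => q.2 == p.2))).contains q)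
        = (pvC r).filter (fun q => !(q.2 == p.2)) := by
      apply List.filter_congr
      intro q hq
      have hqr : q ∈ r := (pv_mem_C r q).mp hq
      congr 1
      rw [Bool.eq_iff_iff]
      simp only [PySem.Set.contains_iff, PySem.Set.mem_ofList, List.mem_cons, List.mem_filter,
        beq_iff_eq]
      constructor
      · rintro (rfl | ⟨-, h⟩)
        · rfl
        · exact h
      · intro h; exact Or.inr ⟨hqr, h⟩
    rw [hfil]
    have hblk0 : (p :: r).filter (fun q => q.2 == p.2) = p :: r.filter (fun q => q.2 == p.2) :=
      List.filter_cons_of_pos (by simp)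
    have hblks : ((PySem.Set.ofList (r.map Prod.snd)).discard p.2).flatMap
        (fun y => PySem.Set.ofList ((p :: r).filter (fun q => q.2 == y)))
        = ((PySem.Set.ofList (r.map Prod.snd)).discard p.2).flatMap
        (fun y => PySem.Set.ofList (r.filter (fun q => q.2 == y))) := by
      apply List.flatMap_congr
      intro y hy
      have hyne : y ≠ p.2 := ((PySem.Set.mem_discard _ _ _).mp hy).2
      rw [List.filter_cons_of_neg (by simp; exact fun hh => hyne hh.symm)]
    have hR : pvC (p :: r) = PySem.Set.ofList (p :: r.filter (fun q => q.2 == p.2))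
        ++ ((PySem.Set.ofList (r.map Prod.snd)).discard p.2).flatMap
            (fun y => PySem.Set.ofList (r.filter (fun q => q.2 == y))) := by
      unfold pvC
      rw [List.map_cons, PySem.Set.ofList_cons, List.flatMap_cons, hblk0, hblks]
    rw [hR]
    congr 1
    -- (pvC r).filter (≠ p.2 on y) = flatMap over the discarded key set
    unfold pvC
    rw [List.filter_flatMap]
    rw [pv_flatMap_drop_empty (PySem.Set.ofList (r.map Prod.snd))
      (fun y => (PySem.Set.ofList (r.filter (fun q => q.2 == y))).filter (fun q => !(q.2 == p.2)))
      (fun y => PySem.Set.ofList (r.filter (fun q => q.2 == y))) p.2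
      ?_ ?_]
    · rfl
    · intro y _ hyne
      apply List.filter_eq_self.mpr
      intro q hq
      have : q.2 = y := by simpa using (List.mem_filter.mp ((PySem.Set.mem_ofList _ _).mp hq)).2
      simp [this, hyne]
    · apply List.filter_eq_nil_iff.mpr
      intro q hq
      have : q.2 = p.2 := by simpa using (List.mem_filter.mp ((PySem.Set.mem_ofList _ _).mp hq)).2
      simp [this]

-- ===== VERDICT (by name: the statement is the Claim_ definition above) =====
theorem ReserchY_spec : Claim_equal_ReserchY := by
  intro Turtle _
  unfold Spec_ReserchY
  rw [pv_A_char, pv_B_char, pv_T2_C,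
    pv_ofList_flatMap Turtle _ (PySem.Set.nodup_ofList _)]
  rfl
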